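-- pv_equiv track=rewrite | github.com/MrBrantCode/unitest_baseline | mut_generate/mist_train_cf/cf_4881/solution.py | count_ed_words
-- ===== SOURCE A (Python) =====
-- def count_ed_words(text):
--     """
--     This function counts the number of words in a given text that start with a vowel,
--     contain the string "ed", and have at least one consonant after the "ed".
--
--     Parameters:
--     text (str): The input text.
--
--     Returns:
--     int: The count of words that meet the specified conditions.
--     """
--
--     # Define vowels and consonants
--     vowels = 'aeiou'
--     consonants = 'bcdfghjklmnpqrstvwxyz'
--
--     # Split the text into words
--     words = text.split()
--
--     # Initialize a counter for the words that meet the conditions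
--     count = 0
--
--     # Iterate over each word in the text
--     for word in words:
--         # Check if the word starts with a vowel and contains 'ed'
--         if word[0].lower() in vowels and 'ed' in word:
--             # Find the index of 'ed' in the word
--             ed_index = word.index('ed')
--
--             # Check if there's at least one consonant after 'ed'
--             if any(char.lower() in consonants for char in word[ed_index + 2:]):
--                 # If the word meets all conditions, increment the counter
--                 count += 1
--
--     # Return the count of words that meet the conditions
--     return count
-- ===== SOURCE B (Python) =====
-- def count_ed_words(text):
--     """Count words that start with a vowel, contain 'ed', and have a
--     consonant somewhere after that 'ed'.
--
--     Different strategy from the index()+forward-scan version: scan each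
--     word BACKWARD for its last consonant (index k) and then just ask
--     whether 'ed' occurs inside the prefix word[:k] -- an 'ed' fully
--     before the last consonant is exactly an 'ed' followed by a consonant.
--     """
--     vowels = 'aeiou'
--     consonants = 'bcdfghjklmnpqrstvwxyz'
--     total = 0
--     for w in text.split():
--         if w[0].lower() in vowels:
--             k = len(w) - 1
--             while k >= 0 and w[k].lower() not in consonants:
--                 k -= 1
--             if k >= 0 and 'ed' in w[:k]:
--                 total += 1
--     return total
-- ===== Notes on version B (the rewrite author's own statement) =====
-- stated objective: alternative
-- what changed: Instead of locating the first e-d occurrence with index() and then forward-scanning the suffix with any() for a consonant, B scans each word backward for its last consonant at index k and runs one substring test on the prefix word[:k]; the index()/slice/any() pass disappears.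
import Mathlib
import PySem

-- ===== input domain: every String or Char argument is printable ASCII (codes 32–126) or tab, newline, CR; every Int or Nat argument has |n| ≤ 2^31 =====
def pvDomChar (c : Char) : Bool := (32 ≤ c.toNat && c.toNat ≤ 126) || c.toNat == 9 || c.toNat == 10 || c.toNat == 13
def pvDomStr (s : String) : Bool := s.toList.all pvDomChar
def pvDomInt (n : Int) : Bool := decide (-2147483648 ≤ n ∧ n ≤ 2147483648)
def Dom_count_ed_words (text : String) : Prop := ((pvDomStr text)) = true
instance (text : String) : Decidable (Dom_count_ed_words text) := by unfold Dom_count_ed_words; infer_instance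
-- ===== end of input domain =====

-- B replaces A's index('ed') + forward any()-scan by a backward scan for the last
-- consonant k followed by a single substring test 'ed' in w[:k] (objective: alternative).

-- ===== PORT A =====
def pvVowels : List Char := ['a', 'e', 'i', 'o', 'u']
def pvCons : List Char :=
  ['b','c','d','f','g','h','j','k','l','m','n','p','q','r','s','t','v','w','x','y','z']

-- per-word test of A; word[0] ported with getD (words from split() are never empty)
def pvATest (w : List Char) : Bool :=
  if pvVowels.contains (PySem.Chars.lowerChar (w.getD 0 ' ')) &&
     PySem.Chars.isIn ['e', 'd'] w then
    let edIdx := PySem.Chars.find w ['e', 'd']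
    (PySem.List.slice w (some (edIdx + 2)) none).any
      (fun c => pvCons.contains (PySem.Chars.lowerChar c))
  else false

def count_ed_words (text : String) : Int :=
  (PySem.Chars.split₀ text.toList).foldl
    (fun count w => if pvATest w then count + 1 else count) 0

-- ===== PORT B =====
-- the backward while-loop: pvLastCons w n walks k = n-1, n-2, … until a consonant; -1 if none
def pvLastCons (w : List Char) : Nat → Int
  | 0 => -1
  | n + 1 =>
    if pvCons.contains (PySem.Chars.lowerChar (w.getD n ' ')) then (n : Int)
    else pvLastCons w n

def pvBTest (w : List Char) : Bool :=
  if pvVowels.contains (PySem.Chars.lowerChar (w.getD 0 ' ')) then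
    let k := pvLastCons w w.length
    decide (0 ≤ k) && PySem.Chars.isIn ['e', 'd'] (PySem.List.slice w none (some k))
  else false

def count_ed_words_alt (text : String) : Int :=
  (PySem.Chars.split₀ text.toList).foldl
    (fun total w => if pvBTest w then total + 1 else total) 0

-- ===== PRECONDITION & SPEC =====
def Spec_count_ed_words (text : String) (out : Int) : Prop := out = count_ed_words_alt text
instance (text : String) (out : Int) : Decidable (Spec_count_ed_words text out) := by unfold Spec_count_ed_words; infer_instance

-- ===== CLAIM (what is proved, stated in full; the proofs are below) =====
def Claim_equal_count_ed_words : Prop := ∀ (text : String), Dom_count_ed_words text → Spec_count_ed_words text (count_ed_words text)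

-- ===== LEMMAS AND PROOFS =====

def pvP (c : Char) : Bool := pvCons.contains (PySem.Chars.lowerChar c)

-- pvLastCons w n = -1 exactly when no index below n carries a consonant
theorem pvLastCons_neg (w : List Char) (n : Nat) :
    pvLastCons w n = -1 ↔ ∀ m < n, pvP (w.getD m ' ') = false := by
  induction n with
  | zero => simp [pvLastCons]
  | succ n ih =>
    simp only [pvLastCons]
    by_cases hc : pvCons.contains (PySem.Chars.lowerChar (w.getD n ' ')) = true
    · rw [if_pos hc]
      constructor
      · intro h; exact absurd h (by omega)
      · intro h
        have hn := h n (Nat.lt_succ_self n)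
        simp only [pvP] at hn
        rw [hc] at hn; cases hn
    · rw [if_neg hc, ih]
      constructor
      · intro h m hm
        rcases Nat.lt_succ_iff_lt_or_eq.mp hm with hlt | rfl
        · exact h m hlt
        · simpa [pvP] using hc
      · intro h m hm
        exact h m (Nat.lt_succ_of_lt hm)

-- when pvLastCons w n ≠ -1 it is the LARGEST consonant index below n
theorem pvLastCons_pos (w : List Char) (n : Nat) (h : pvLastCons w n ≠ -1) :
    ∃ m : Nat, pvLastCons w n = (m : Int) ∧ m < n ∧ pvP (w.getD m ' ') = true ∧
      ∀ j, m < j → j < n → pvP (w.getD j ' ') = false := by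
  induction n with
  | zero => simp [pvLastCons] at h
  | succ n ih =>
    by_cases hc : pvP (w.getD n ' ') = true
    · refine ⟨n, ?_, Nat.lt_succ_self n, hc, fun j hj hj' => absurd (by omega) (by omega)⟩
      simp only [pvLastCons, pvP] at hc ⊢; rw [if_pos hc]
    · have hstep : pvLastCons w (n + 1) = pvLastCons w n := by
        simp only [pvLastCons, pvP] at hc ⊢
        rw [if_neg (by simp_all)]
      rw [hstep] at h ⊢
      obtain ⟨m, hm, hmn, hP, hmax⟩ := ih h
      refine ⟨m, hm, Nat.lt_succ_of_lt hmn, hP, fun j hj hj' => ?_⟩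
      rcases Nat.lt_succ_iff_lt_or_eq.mp hj' with hlt | rfl
      · exact hmax j hj hlt
      · simpa using hc

-- any index below w.length that the backward scan skipped is not a consonant,
-- and membership in a drop/slice is membership at an index: the two per-word tests agree
theorem pvATest_eq_pvBTest (w : List Char) : pvATest w = pvBTest w := by
  unfold pvATest pvBTest
  by_cases hv : pvVowels.contains (PySem.Chars.lowerChar (w.getD 0 ' ')) = true
  · simp only [hv, Bool.true_and, if_true]
    rcases eq_or_ne (pvLastCons w w.length) (-1) with hk | hk
    · -- no consonant anywhere in w: both tests fail
      have hall := (pvLastCons_neg w w.length).mp hk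
      rw [hk]
      simp only [show decide ((0:Int) ≤ -1) = false by decide, Bool.false_and]
      split_ifs with hIn
      · rw [← Bool.not_eq_true, List.any_eq_true]
        rintro ⟨x, hx, hPx⟩
        have hi : 0 ≤ PySem.Chars.find w ['e','d'] :=
          (PySem.Chars.find_nonneg_iff w ['e','d']).mpr ((PySem.Chars.isIn_iff_infix _ _).mp hIn)
        rw [PySem.List.slice_from w (by omega)] at hx
        have hxw : x ∈ w := List.mem_of_mem_drop hx
        obtain ⟨n, hn, hnx⟩ := List.mem_iff_getElem.mp hxw
        have := hall n hn
        rw [List.getD_eq_getElem w ' ' hn, hnx] at this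
        simp only [pvP] at this
        rw [this] at hPx; cases hPx
      · rfl
    · -- the last consonant sits at index m
      obtain ⟨m, hm, hmlen, hPm, hmax⟩ := pvLastCons_pos w w.length hk
      rw [hm, PySem.List.slice_to_natCast]
      simp only [show decide ((0:Int) ≤ (m:Int)) = true by simp, Bool.true_and]
      by_cases hIn : PySem.Chars.isIn ['e','d'] w = true
      · simp only [hIn, if_true]
        have hi : 0 ≤ PySem.Chars.find w ['e','d'] :=
          (PySem.Chars.find_nonneg_iff w ['e','d']).mpr ((PySem.Chars.isIn_iff_infix _ _).mp hIn)
        obtain ⟨hpre, hmin⟩ := PySem.Chars.find_spec hi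
        set i0 := (PySem.Chars.find w ['e','d']).toNat with hi0
        have hsl : PySem.List.slice w (some (PySem.Chars.find w ['e','d'] + 2)) none
            = w.drop (i0 + 2) := by
          rw [PySem.List.slice_from w (by omega)]; congr 1; omega
        rw [hsl, Bool.eq_iff_iff]
        constructor
        · intro hAny
          obtain ⟨x, hx, hPx⟩ := List.any_eq_true.mp hAny
          obtain ⟨j, hj, hjx⟩ := List.mem_iff_getElem.mp hx
          have hjlen : i0 + 2 + j < w.length := by
            have := hj; simp only [List.length_drop] at this; omega
          rw [List.getElem_drop] at hjx
          -- the consonant x sits at index i0+2+j, so the LAST consonant index m is ≥ i0+2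
          have hle : i0 + 2 + j ≤ m := by
            by_contra hgt
            have := hmax (i0 + 2 + j) (by omega) hjlen
            rw [List.getD_eq_getElem w ' ' hjlen, hjx] at this
            simp only [pvP] at this
            rw [this] at hPx; cases hPx
          refine (PySem.Chars.exists_prefix_drop_iff_isIn ['e','d'] (w.take m)).mp ⟨i0, ?_⟩
          rw [List.drop_take, List.prefix_take_iff]
          exact ⟨hpre, by simp; omega⟩
        · intro hInTake
          obtain ⟨j, hj⟩ :=
            (PySem.Chars.exists_prefix_drop_iff_isIn ['e','d'] (w.take m)).mpr hInTake
          rw [List.drop_take, List.prefix_take_iff] at hj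
          obtain ⟨hj', hjlen⟩ := hj
          simp only [List.length_cons, List.length_nil] at hjlen
          have hij : i0 ≤ j := by
            by_contra hlt
            exact hmin j (by omega) hj'
          refine List.any_eq_true.mpr ⟨w[m]'hmlen, ?_, ?_⟩
          · have hgm : (w.drop (i0 + 2))[m - (i0 + 2)]'(by simp; omega) = w[m]'hmlen := by
              rw [List.getElem_drop]; congr 1; omega
            exact hgm ▸ List.getElem_mem _
          · have := hPm
            rw [List.getD_eq_getElem w ' ' hmlen] at this
            simpa [pvP] using this
      · -- 'ed' not in w: A fails by its guard, and 'ed' cannot be in a prefix of w either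
        rw [if_neg (by simp [hIn]), eq_comm, ← Bool.not_eq_true]
        intro habs
        exact hIn (((PySem.Chars.isIn_iff_infix _ _).mp habs).trans
          (List.take_prefix m w).isInfix |> (PySem.Chars.isIn_iff_infix _ _).mpr)
  · rw [Bool.not_eq_true] at hv
    simp only [List.getD] at hv
    simp at hv
    simp [hv]

theorem count_ed_words_spec : Claim_equal_count_ed_words := by
  intro text _
  unfold Spec_count_ed_words count_ed_words count_ed_words_alt
  congr 1
  funext count w
  rw [pvATest_eq_pvBTest]
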